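-- pv_equiv track=rewrite | github.com/Rachel-commits/advent-of-code | 2022/day6_code.py | get_start_position
-- ===== SOURCE A (Python) =====
-- def get_start_position(input_list, num_chars):
--     check_list =[]
--     for i, char in enumerate(input_list):
--         if i < num_chars:
--             check_list.append(char)
--         else:
--              #  check  for dupes
--             if(len(set(check_list)) <  len(check_list)):
--                 check_list.pop(0)
--                 check_list.append(char)
--             else:
--                 break
--     return i
-- ===== SOURCE B (Python) =====
-- def get_start_position(input_list, num_chars):
--     n = len(input_list)
--     counts = {}
--     dupes = 0
--     for i in range(n):
--         if i >= num_chars and dupes == 0: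
--             return i
--         c = input_list[i]
--         counts[c] = counts.get(c, 0) + 1
--         if counts[c] == 2:
--             dupes += 1
--         if i >= num_chars:
--             d = input_list[i - num_chars]
--             counts[d] -= 1
--             if counts[d] == 1:
--                 dupes -= 1
--     return n - 1
-- ===== Notes on version B (the rewrite author's own statement) =====
-- stated objective: faster
-- what changed: Replaces A's per-step rebuild of set(check_list) over the window (O(n*k) total) by a single-pass sliding window that maintains a char-count dict and a counter of duplicated chars, updated in O(1) per step.
-- outside the precondition, e.g. on get_start_position('', 4): A raises UnboundLocalError, B returns -1
import Mathlib
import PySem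

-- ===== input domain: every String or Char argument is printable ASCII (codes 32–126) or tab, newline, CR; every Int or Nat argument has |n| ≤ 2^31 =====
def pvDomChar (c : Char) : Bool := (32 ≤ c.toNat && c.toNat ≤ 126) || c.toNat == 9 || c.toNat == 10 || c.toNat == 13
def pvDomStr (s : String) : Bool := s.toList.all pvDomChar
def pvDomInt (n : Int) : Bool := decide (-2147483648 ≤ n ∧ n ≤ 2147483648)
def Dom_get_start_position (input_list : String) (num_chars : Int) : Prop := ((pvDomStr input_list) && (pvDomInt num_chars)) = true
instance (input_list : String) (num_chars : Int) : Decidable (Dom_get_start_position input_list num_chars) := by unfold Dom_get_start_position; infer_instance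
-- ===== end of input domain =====

-- B replaces A's per-step set(check_list) rebuild by a sliding window with an
-- incremental char-count dict and a duplicate counter (objective: faster).

-- ===== PORT A =====
-- loop over enumerate(input_list); state: check_list; returns i at break, or the last i at loop end
def pvA_go (num_chars : Int) : List Char → Int → List Char → Int
  | [], i, _ => i - 1
  | c :: rest, i, check =>
    if i < num_chars then
      pvA_go num_chars rest (i + 1) (check ++ [c])
    else if (PySem.Set.ofList check).length < check.length then
      pvA_go num_chars rest (i + 1) (check.drop 1 ++ [c])
    else i

def get_start_position (input_list : String) (num_chars : Int) : Int :=
  pvA_go num_chars input_list.toList 0 []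

-- ===== PORT B =====
-- for i in range(n), maintaining the counts dict and the dupes counter (Source B)
def pvB_go (full : List Char) (num_chars : Int) : List Int → PySem.Dict Char Int → Int → Int
  | [], _, _ => (full.length : Int) - 1
  | i :: is, counts, dupes =>
    if i ≥ num_chars ∧ dupes = 0 then i
    else
      let c := PySem.List.pyGetD full i ' '
      let cnt := counts.getD c 0 + 1
      let counts1 := counts.insert c cnt
      let dupes1 := if cnt = 2 then dupes + 1 else dupes
      if i ≥ num_chars then
        let d := PySem.List.pyGetD full (i - num_chars) ' '
        let v := counts1.getD d 0 - 1
        let counts2 := counts1.insert d v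
        let dupes2 := if v = 1 then dupes1 - 1 else dupes1
        pvB_go full num_chars is counts2 dupes2
      else
        pvB_go full num_chars is counts1 dupes1

def get_start_position_alt (input_list : String) (num_chars : Int) : Int :=
  pvB_go input_list.toList num_chars
    (PySem.List.pyRange 0 (input_list.toList.length : Int) 1) PySem.Dict.empty 0

-- ===== PRECONDITION & SPEC =====
-- Pre_ excludes only the empty string, on which A raises UnboundLocalError
-- (the loop variable i is never assigned before 'return i').
def Pre_get_start_position (input_list : String) (num_chars : Int) : Prop :=
  input_list ≠ ""
instance (input_list : String) (num_chars : Int) : Decidable (Pre_get_start_position input_list num_chars) := by unfold Pre_get_start_position; infer_instance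

def pvWitness_get_start_position : String × Int := ("aabcde", 4)

def Spec_get_start_position (input_list : String) (num_chars : Int) (out : Int) : Prop := out = get_start_position_alt input_list num_chars
instance (input_list : String) (num_chars : Int) (out : Int) : Decidable (Spec_get_start_position input_list num_chars out) := by unfold Spec_get_start_position; infer_instance

-- ===== CLAIM (what is proved, stated in full; the proofs are below) =====
def Claim_equal_get_start_position : Prop := ∀ (input_list : String) (num_chars : Int), Dom_get_start_position input_list num_chars → Pre_get_start_position input_list num_chars → Spec_get_start_position input_list num_chars (get_start_position input_list num_chars)

-- ===== LEMMAS AND PROOFS =====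

def pvND (l : List Char) : ℕ := (l.toFinset.filter (fun c => 2 ≤ l.count c)).card

lemma pvND_eq_zero (l : List Char) : pvND l = 0 ↔ l.Nodup := by
  unfold pvND
  rw [Finset.card_eq_zero, Finset.filter_eq_empty_iff, List.nodup_iff_count_le_one]
  constructor
  · intro h x
    by_cases hx : x ∈ l
    · have := h (List.mem_toFinset.mpr hx); omega
    · simp [List.count_eq_zero_of_not_mem hx]
  · intro h x hx
    have := h x; simp; omega

lemma pvND_cons (d : Char) (l : List Char) :
    pvND (d :: l) = pvND l + (if l.count d = 1 then 1 else 0) := by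
  unfold pvND
  rcases Nat.lt_or_ge (l.count d) 1 with h | h
  · have hd : l.count d = 0 := by omega
    have hmem : d ∉ l := by rwa [← List.count_eq_zero]
    have : (List.toFinset (d :: l)).filter (fun c => 2 ≤ (d :: l).count c)
        = l.toFinset.filter (fun c => 2 ≤ l.count c) := by
      apply Finset.ext; intro x
      simp only [Finset.mem_filter, List.mem_toFinset, List.mem_cons, List.count_cons]
      constructor
      · rintro ⟨hx | hx, hc⟩
        · subst hx; simp [hd] at hc
        · rcases eq_or_ne x d with rfl | hne
          · exact absurd hx hmem
          · simp [Ne.symm hne] at hc; exact ⟨hx, by omega⟩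
      · rintro ⟨hx, hc⟩
        rcases eq_or_ne x d with rfl | hne
        · exact absurd hx hmem
        · exact ⟨Or.inr hx, by simp [Ne.symm hne]; omega⟩
    rw [this]; simp [hd]
  · rcases Nat.lt_or_ge (l.count d) 2 with h2 | h2
    · have hd : l.count d = 1 := by omega
      have : (List.toFinset (d :: l)).filter (fun c => 2 ≤ (d :: l).count c)
          = insert d (l.toFinset.filter (fun c => 2 ≤ l.count c)) := by
        apply Finset.ext; intro x
        simp only [Finset.mem_filter, Finset.mem_insert, List.mem_toFinset, List.mem_cons,
          List.count_cons]
        constructor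
        · rintro ⟨hx, hc⟩
          rcases eq_or_ne x d with rfl | hne
          · exact Or.inl rfl
          · simp [Ne.symm hne] at hc
            rcases hx with hx | hx
            · exact absurd hx hne
            · exact Or.inr ⟨hx, by omega⟩
        · rintro (rfl | ⟨hx, hc⟩)
          · exact ⟨Or.inr (List.count_pos_iff.mp (by omega)), by simp [hd]⟩
          · rcases eq_or_ne x d with rfl | hne
            · exact ⟨Or.inl rfl, by simp; omega⟩
            · exact ⟨Or.inr hx, by simp [Ne.symm hne]; omega⟩
      rw [this, Finset.card_insert_of_notMem (by simp [hd])]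
      simp [hd]
    · have : (List.toFinset (d :: l)).filter (fun c => 2 ≤ (d :: l).count c)
          = l.toFinset.filter (fun c => 2 ≤ l.count c) := by
        apply Finset.ext; intro x
        simp only [Finset.mem_filter, List.mem_toFinset, List.mem_cons, List.count_cons]
        constructor
        · rintro ⟨hx, hc⟩
          rcases eq_or_ne x d with rfl | hne
          · exact ⟨List.count_pos_iff.mp (by omega), by omega⟩
          · simp [Ne.symm hne] at hc; exact ⟨hx.resolve_left hne, by omega⟩
        · rintro ⟨hx, hc⟩
          refine ⟨Or.inr hx, ?_⟩
          rcases eq_or_ne d x with rfl | hne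
          · simp; omega
          · simp [hne]; omega
      rw [this]
      have : l.count d ≠ 1 := by omega
      simp [this]

lemma pvND_perm {l l' : List Char} (h : l.Perm l') : pvND l = pvND l' := by
  unfold pvND
  congr 1
  apply Finset.ext; intro x
  simp [List.mem_toFinset, h.mem_iff, h.count_eq]



lemma pvND_append (l : List Char) (c : Char) :
    pvND (l ++ [c]) = pvND l + (if l.count c = 1 then 1 else 0) := by
  rw [pvND_perm (List.perm_append_singleton c l), pvND_cons]

lemma pv_ofList_len (l : List Char) : (PySem.Set.ofList l).length = l.toFinset.card := by
  rw [← List.toFinset_card_of_nodup (PySem.Set.nodup_ofList (xs := l))]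
  congr 1
  apply Finset.ext; intro x
  simp [List.mem_toFinset, PySem.Set.mem_ofList]

lemma pv_set_len_lt (l : List Char) :
    ((PySem.Set.ofList l).length < l.length) ↔ ¬ l.Nodup := by
  rw [pv_ofList_len, List.card_toFinset]
  constructor
  · intro h hn
    rw [List.Nodup.dedup hn] at h; omega
  · intro hn
    have hle := (List.dedup_sublist l).length_le
    rcases Nat.lt_or_ge l.dedup.length l.length with h | h
    · exact h
    · exfalso
      have : l.dedup = l := (List.dedup_sublist l).eq_of_length (by omega)
      exact hn (this ▸ l.nodup_dedup)

lemma pv_getD_mid (pre l : List Char) (x : Char) :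
    PySem.List.pyGetD (pre ++ x :: l) ((pre.length : Int)) ' ' = x := by
  rw [PySem.List.pyGetD_natCast]
  rw [List.getD_eq_getElem?_getD, List.getElem?_append_right (le_refl _)]
  simp

lemma pv_main (num_chars : Int) (full : List Char) :
    ∀ (susp pre check : List Char) (counts : PySem.Dict Char Int) (dupes : Int) (i : Int),
      i = pre.length + check.length →
      full = pre ++ check ++ susp →
      check.length = min (pre.length + check.length) num_chars.toNat →
      (∀ x, counts.getD x 0 = (check.count x : Int)) →
      dupes = (pvND check : Int) →
      pvA_go num_chars susp i check
        = pvB_go full num_chars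
            (PySem.List.pyRange i (full.length : Int) 1) counts dupes := by
  intro susp
  induction susp with
  | nil =>
    intro pre check counts dupes i hi hfull hnat hcounts hdupes
    have hlen : full.length = pre.length + check.length := by simp [hfull]
    rw [PySem.List.pyRange_one_eq_nil (by omega)]
    simp only [pvA_go, pvB_go]
    omega
  | cons c rest IH =>
    intro pre check counts dupes i hi hfull hnat hcounts hdupes
    have hlen : full.length = pre.length + check.length + (rest.length + 1) := by
      simp [hfull]; omega
    rw [PySem.List.pyRange_one_cons (by omega)]
    by_cases hlt : i < num_chars
    · -- fill phase: both append c
      have hc : PySem.List.pyGetD full i ' ' = c := by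
        have hpre : pre.length = 0 := by omega
        have hpre' : pre = [] := List.length_eq_zero_iff.mp hpre
        subst hpre'
        have h1 : full = check ++ c :: rest := by simpa using hfull
        have h2 : i = ((check.length : ℕ) : Int) := by simp at hi; omega
        rw [h1, h2]
        exact pv_getD_mid check rest c
      have hA : pvA_go num_chars (c :: rest) i check
          = pvA_go num_chars rest (i + 1) (check ++ [c]) := by
        simp only [pvA_go]
        rw [if_pos hlt]
      have hB : pvB_go full num_chars (i :: PySem.List.pyRange (i+1) (full.length : Int) 1) counts dupes
          = pvB_go full num_chars (PySem.List.pyRange (i+1) (full.length : Int) 1)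
              (counts.insert c (counts.getD c 0 + 1))
              (if counts.getD c 0 + 1 = 2 then dupes + 1 else dupes) := by
        simp only [pvB_go, hc]
        rw [if_neg (by omega), if_neg (by omega)]
      rw [hA, hB]
      apply IH pre (check ++ [c])
      · simp; omega
      · simpa using hfull
      · simp; omega
      · intro x
        rw [PySem.Dict.getD_insert]
        by_cases hx : x = c
        · subst hx; simp [hcounts, List.count_append, List.count_cons]
        · simp [hx, hcounts, List.count_append, List.count_cons, Ne.symm hx]
      · rw [pvND_append]
        by_cases h1 : check.count c = 1
        · have h2 : counts.getD c 0 + 1 = 2 := by rw [hcounts]; omega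
          simp [h1, h2, hdupes]
        · have h2 : ¬ (counts.getD c 0 + 1 = 2) := by rw [hcounts]; omega
          simp [h1, h2, hdupes]
    · -- steady phase
      by_cases hz : dupes = 0
      · -- window distinct: both return i
        have hnd : check.Nodup := (pvND_eq_zero check).mp (by omega)
        have hA : pvA_go num_chars (c :: rest) i check = i := by
          simp only [pvA_go]
          rw [if_neg hlt, if_neg (by rw [pv_set_len_lt]; exact not_not_intro hnd)]
        have hB : pvB_go full num_chars (i :: PySem.List.pyRange (i+1) (full.length : Int) 1) counts dupes = i := by
          simp only [pvB_go]
          rw [if_pos ⟨by omega, hz⟩]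
        rw [hA, hB]
      · -- duplicate in window: both slide
        have hnd : ¬ check.Nodup := by
          intro h
          exact hz (by rw [hdupes, (pvND_eq_zero check).mpr h]; simp)
        obtain ⟨d, ch', rfl⟩ : ∃ d ch', check = d :: ch' := by
          cases check with
          | nil => exact absurd List.nodup_nil hnd
          | cons a l => exact ⟨a, l, rfl⟩
        simp only [List.length_cons] at hi hnat hlen
        have hklen : num_chars = (ch'.length : Int) + 1 := by omega
        have hik : i - num_chars = (pre.length : Int) := by omega
        have hc : PySem.List.pyGetD full i ' ' = c := by
          have h1 : full = (pre ++ (d :: ch')) ++ c :: rest := by simpa [List.append_assoc] using hfull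
          have h2 : i = (((pre ++ (d :: ch')).length : ℕ) : Int) := by simp; omega
          rw [h1, h2, pv_getD_mid]
        have hd : PySem.List.pyGetD full (i - num_chars) ' ' = d := by
          have h1 : full = pre ++ d :: (ch' ++ (c :: rest)) := by simpa using hfull
          rw [hik, h1, pv_getD_mid]
        have hA : pvA_go num_chars (c :: rest) i (d :: ch')
            = pvA_go num_chars rest (i + 1) (ch' ++ [c]) := by
          simp only [pvA_go]
          rw [if_neg hlt, if_pos (by rw [pv_set_len_lt]; exact hnd)]
          simp
        have hB : pvB_go full num_chars (i :: PySem.List.pyRange (i+1) (full.length : Int) 1) counts dupes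
            = pvB_go full num_chars (PySem.List.pyRange (i+1) (full.length : Int) 1)
                ((counts.insert c (counts.getD c 0 + 1)).insert d
                  ((counts.insert c (counts.getD c 0 + 1)).getD d 0 - 1))
                (if (counts.insert c (counts.getD c 0 + 1)).getD d 0 - 1 = 1
                  then (if counts.getD c 0 + 1 = 2 then dupes + 1 else dupes) - 1
                  else (if counts.getD c 0 + 1 = 2 then dupes + 1 else dupes)) := by
          simp only [pvB_go, hc, hd]
          rw [if_neg (by intro h; exact hz h.2), if_pos (by omega)]
        rw [hA, hB]
        have hcnt1 : ∀ x, (counts.insert c (counts.getD c 0 + 1)).getD x 0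
            = (((d :: ch') ++ [c]).count x : Int) := by
          intro x
          rw [PySem.Dict.getD_insert]
          by_cases hx : x = c
          · subst hx
            have hcc : List.count x ((d :: ch') ++ [x]) = List.count x (d :: ch') + 1 := by
              simp [List.count_cons, List.count_append]
              omega
            rw [if_pos rfl, hcounts, hcc]
            push_cast; ring
          · have hcc : List.count x ((d :: ch') ++ [c]) = List.count x (d :: ch') := by
              simp [List.count_cons, List.count_append, hx, Ne.symm hx]
            rw [if_neg hx, hcounts, hcc]
        have heq : ((d :: ch') ++ [c]) = d :: (ch' ++ [c]) := rfl
        apply IH (pre ++ [d]) (ch' ++ [c])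
        · simp; omega
        · simpa [List.append_assoc] using hfull
        · simp; omega
        · intro x
          rw [PySem.Dict.getD_insert]
          by_cases hx : x = d
          · subst hx
            rw [if_pos rfl, hcnt1, heq, List.count_cons_self]
            push_cast; omega
          · rw [if_neg hx, hcnt1, heq]
            simp [List.count_cons, hx, Ne.symm hx]
        · -- dupes invariant after slide
          rw [hcnt1 d, heq, List.count_cons_self]
          have key : (pvND ((d :: ch') ++ [c]) : ℕ)
              = pvND (ch' ++ [c]) + (if (ch' ++ [c]).count d = 1 then 1 else 0) := by
            rw [heq]; exact pvND_cons d (ch' ++ [c])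
          have ha1 : pvND ((d :: ch') ++ [c])
              = pvND (d :: ch') + (if (d :: ch').count c = 1 then 1 else 0) :=
            pvND_append (d :: ch') c
          have hgc : counts.getD c 0 = ((d :: ch').count c : Int) := hcounts c
          by_cases b2 : (ch' ++ [c]).count d = 1
          · rw [if_pos (by push_cast; omega)]
            rw [if_pos b2] at key
            by_cases b1 : (d :: ch').count c = 1
            · rw [if_pos (by rw [hgc, b1]; norm_num)]
              rw [if_pos b1] at ha1
              omega
            · rw [if_neg (by rw [hgc]; push_cast; omega)]
              rw [if_neg b1] at ha1
              omega
          · rw [if_neg (by push_cast; omega)]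
            rw [if_neg b2] at key
            by_cases b1 : (d :: ch').count c = 1
            · rw [if_pos (by rw [hgc, b1]; norm_num)]
              rw [if_pos b1] at ha1
              omega
            · rw [if_neg (by rw [hgc]; push_cast; omega)]
              rw [if_neg b1] at ha1
              omega

-- ===== VERDICT (by name: the statement is the Claim_ definition above) =====
theorem get_start_position_spec : Claim_equal_get_start_position := by
  intro s k _ _
  unfold Spec_get_start_position get_start_position get_start_position_alt
  have h := pv_main k s.toList s.toList [] [] PySem.Dict.empty 0 0
    (by simp) (by simp) (by simp) (by intro x; simp [PySem.Dict.getD_empty]) (by simp [pvND])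
  simpa using h
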